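-- pv_equiv track=rewrite | github.com/xiaolutang/personal-growth-assistant | backend/app/services/review_service.py | _analyze_category_distribution
-- ===== SOURCE A (Python) =====
-- from typing import List, Dict, Any, Optional, TYPE_CHECKING
--
-- def _analyze_category_distribution(
--     entries: List[dict]
-- ) -> tuple:
--     """分析条目分类分布，返回 (total, category_counts, curr_tasks, curr_notes, curr_inbox)"""
--     curr_tasks = [e for e in entries if e.get("type") == "task"]
--     curr_notes = [e for e in entries if e.get("type") == "note"]
--     curr_inbox = [e for e in entries if e.get("type") == "inbox"]
--
--     category_counts: Dict[str, int] = {}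
--     for entry in entries:
--         entry_type = entry.get("type", "task")
--         category_counts[entry_type] = category_counts.get(entry_type, 0) + 1
--
--     return len(entries), category_counts, curr_tasks, curr_notes, curr_inbox
-- ===== SOURCE B (Python) =====
-- def _analyze_category_distribution(entries):
--     curr_tasks = []
--     curr_notes = []
--     curr_inbox = []
--     category_counts = {}
--     for e in entries:
--         t = e.get("type")
--         if t == "task":
--             curr_tasks.append(e)
--         elif t == "note":
--             curr_notes.append(e)
--         elif t == "inbox":
--             curr_inbox.append(e)
--         key = t if t is not None else "task"
--         category_counts[key] = category_counts.get(key, 0) + 1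
--     return len(entries), category_counts, curr_tasks, curr_notes, curr_inbox
-- ===== Notes on version B (the rewrite author's own statement) =====
-- stated objective: alternative
-- what changed: Replaces A's four separate passes over entries (three list comprehensions plus a counting loop) with a single loop that classifies each entry into its list and updates the count dict as it goes.
import Mathlib
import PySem

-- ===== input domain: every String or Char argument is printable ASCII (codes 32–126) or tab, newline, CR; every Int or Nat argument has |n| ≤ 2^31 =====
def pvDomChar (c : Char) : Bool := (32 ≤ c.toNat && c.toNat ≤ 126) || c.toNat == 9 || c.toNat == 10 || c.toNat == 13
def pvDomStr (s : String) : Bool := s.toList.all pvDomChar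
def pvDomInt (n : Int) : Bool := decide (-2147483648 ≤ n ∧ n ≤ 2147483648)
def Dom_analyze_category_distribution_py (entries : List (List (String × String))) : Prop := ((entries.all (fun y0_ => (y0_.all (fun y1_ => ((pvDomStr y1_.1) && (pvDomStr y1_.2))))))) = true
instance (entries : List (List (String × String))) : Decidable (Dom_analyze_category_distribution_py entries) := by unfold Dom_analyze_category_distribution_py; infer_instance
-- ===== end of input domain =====

-- B fuses A's four passes (three list comprehensions + a counting loop) into one single loop over entries (objective: alternative decomposition, same cost).

-- ===== PORT A =====
def analyze_category_distribution_py (entries : List (List (String × String))) : Int × (List (String × Int)) × (List (List (String × String))) × (List (List (String × String))) × (List (List (String × String))) :=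
  let curr_tasks := entries.filter (fun e => (PySem.Dict.mk e).get? "type" == some "task")
  let curr_notes := entries.filter (fun e => (PySem.Dict.mk e).get? "type" == some "note")
  let curr_inbox := entries.filter (fun e => (PySem.Dict.mk e).get? "type" == some "inbox")
  let category_counts := entries.foldl (fun d e =>
      let entry_type := (PySem.Dict.mk e).getD "type" "task"
      d.insert entry_type (d.getD entry_type 0 + 1)) (PySem.Dict.empty : PySem.Dict String Int)
  ((entries.length : Int), category_counts.items, curr_tasks, curr_notes, curr_inbox)

-- ===== PORT B =====
def analyze_category_distribution_py_alt (entries : List (List (String × String))) : Int × (List (String × Int)) × (List (List (String × String))) × (List (List (String × String))) × (List (List (String × String))) :=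
  let st := entries.foldl (fun (s : List (List (String × String)) × List (List (String × String)) × List (List (String × String)) × PySem.Dict String Int) e =>
      let (ts, ns, ib, d) := s
      let t := (PySem.Dict.mk e).get? "type"
      let (ts, ns, ib) :=
        if t == some "task" then (ts ++ [e], ns, ib)
        else if t == some "note" then (ts, ns ++ [e], ib)
        else if t == some "inbox" then (ts, ns, ib ++ [e])
        else (ts, ns, ib)
      let key := t.getD "task"
      (ts, ns, ib, d.insert key (d.getD key 0 + 1))) ([], [], [], PySem.Dict.empty)
  ((entries.length : Int), st.2.2.2.items, st.1, st.2.1, st.2.2.1)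

-- ===== PRECONDITION & SPEC =====
def Spec_analyze_category_distribution_py (entries : List (List (String × String))) (out : Int × (List (String × Int)) × (List (List (String × String))) × (List (List (String × String))) × (List (List (String × String)))) : Prop := out = analyze_category_distribution_py_alt entries
instance (entries : List (List (String × String))) (out : Int × (List (String × Int)) × (List (List (String × String))) × (List (List (String × String))) × (List (List (String × String)))) : Decidable (Spec_analyze_category_distribution_py entries out) := by
  unfold Spec_analyze_category_distribution_py
  haveI h1 : DecidableEq (List (List (String × String))) := inferInstance
  haveI h2 : DecidableEq (List (String × Int)) := inferInstance
  infer_instance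

-- ===== CLAIM (what is proved, stated in full; the proofs are below) =====
def Claim_equal_analyze_category_distribution_py : Prop := ∀ (entries : List (List (String × String))), Dom_analyze_category_distribution_py entries → Spec_analyze_category_distribution_py entries (analyze_category_distribution_py entries)

-- ===== LEMMAS AND PROOFS =====

-- loop invariant: B's single fold computes A's three filters (prefixed by the accumulators) and A's counting fold
theorem alt_fold_invariant (l : List (List (String × String)))
    (ts ns ib : List (List (String × String))) (d : PySem.Dict String Int) :
    l.foldl (fun (s : List (List (String × String)) × List (List (String × String)) × List (List (String × String)) × PySem.Dict String Int) e =>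
      let (ts, ns, ib, d) := s
      let t := (PySem.Dict.mk e).get? "type"
      let (ts, ns, ib) :=
        if t == some "task" then (ts ++ [e], ns, ib)
        else if t == some "note" then (ts, ns ++ [e], ib)
        else if t == some "inbox" then (ts, ns, ib ++ [e])
        else (ts, ns, ib)
      let key := t.getD "task"
      (ts, ns, ib, d.insert key (d.getD key 0 + 1))) (ts, ns, ib, d)
    = (ts ++ l.filter (fun e => (PySem.Dict.mk e).get? "type" == some "task"),
       ns ++ l.filter (fun e => (PySem.Dict.mk e).get? "type" == some "note"),
       ib ++ l.filter (fun e => (PySem.Dict.mk e).get? "type" == some "inbox"),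
       l.foldl (fun d e =>
         let entry_type := (PySem.Dict.mk e).getD "type" "task"
         d.insert entry_type (d.getD entry_type 0 + 1)) d) := by
  induction l generalizing ts ns ib d with
  | nil => simp
  | cons e l ih =>
    simp only [List.foldl_cons, List.filter_cons]
    by_cases h1 : (PySem.Dict.mk e).get? "type" == some "task"
    · have hk : ((PySem.Dict.mk e).get? "type").getD "task" = (PySem.Dict.mk e).getD "type" "task" := by
        simp [PySem.Dict.getD]
      simp only [h1, if_pos, hk]
      rw [ih]
      have h2 : ((PySem.Dict.mk e).get? "type" == some "note") = false := by
        revert h1; cases (PySem.Dict.mk e).get? "type" <;> simp_all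
      have h3 : ((PySem.Dict.mk e).get? "type" == some "inbox") = false := by
        revert h1; cases (PySem.Dict.mk e).get? "type" <;> simp_all
      simp [h2, h3]
    · by_cases h2 : (PySem.Dict.mk e).get? "type" == some "note"
      · have hk : ((PySem.Dict.mk e).get? "type").getD "task" = (PySem.Dict.mk e).getD "type" "task" := by
          simp [PySem.Dict.getD]
        have h3 : ((PySem.Dict.mk e).get? "type" == some "inbox") = false := by
          revert h2; cases (PySem.Dict.mk e).get? "type" <;> simp_all
        simp only [h1, h2, h3, if_pos, if_neg, Bool.false_eq_true, not_false_iff, hk]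
        rw [ih]
        simp
      · by_cases h3 : (PySem.Dict.mk e).get? "type" == some "inbox"
        · have hk : ((PySem.Dict.mk e).get? "type").getD "task" = (PySem.Dict.mk e).getD "type" "task" := by
            simp [PySem.Dict.getD]
          simp only [h1, h2, h3, if_pos, if_neg, Bool.false_eq_true, not_false_iff, hk]
          rw [ih]
          simp
        · have hk : ((PySem.Dict.mk e).get? "type").getD "task" = (PySem.Dict.mk e).getD "type" "task" := by
            simp [PySem.Dict.getD]
          simp only [h1, h2, h3, if_neg, Bool.false_eq_true, not_false_iff, hk]
          rw [ih]

-- ===== VERDICT (by name: the statement is the Claim_ definition above) =====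
theorem analyze_category_distribution_py_spec : Claim_equal_analyze_category_distribution_py := by
  intro entries _
  unfold Spec_analyze_category_distribution_py analyze_category_distribution_py analyze_category_distribution_py_alt
  rw [alt_fold_invariant]
  simp
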